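-- pv_equiv track=rewrite | github.com/Vishal260700/Placement_Codes | Company Codes/SAP_LABS.py | solve
-- ===== SOURCE A (Python) =====
-- class BIT:
--
--     def __init__(self, size):
--         self.size = size
--         self.Tree = [0 for x in range(0, self.size)]
--
--     def update(self, index, value):
--         while(index < self.size):
--             self.Tree[index] += value
--             index += index & (-index)
--
--     def sum(self, index):
--         total = 0
--         while(index > 0):
--             total += self.Tree[index]
--             index -= index & (-index)
--         return total
--
-- def solve(Arr):
--     bitTree = BIT(10**2)
--     res = 0
--     for i in range(0, len(Arr)):
--         bitTree.update(Arr[i], 1)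
--         larger = i + 1 - bitTree.sum(Arr[i])
--         smaller = bitTree.sum(Arr[i] - 1)
--         res += 2 * min(larger, smaller) + 1
--     return res
-- ===== SOURCE B (Python) =====
-- def solve(Arr):
--     # For each element, count earlier strictly-smaller and strictly-larger elements
--     # by a direct scan over the already-seen prefix; no Fenwick tree needed.
--     res = 0
--     seen = []
--     for x in Arr:
--         smaller = 0
--         larger = 0
--         for y in seen:
--             if y < x:
--                 smaller += 1
--             elif y > x:
--                 larger += 1
--         res += 2 * min(larger, smaller) + 1
--         seen.append(x)
--     return res
-- ===== Notes on version B (the rewrite author's own statement) =====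
-- stated objective: simpler
-- what changed: B drops the Fenwick (binary indexed) tree entirely: for each element it directly scans the prefix of already-seen elements, counting strictly-smaller and strictly-larger ones, and adds 2*min(larger, smaller)+1.
-- crash fix: When the first element outside the range 1..99 is >= 100 or <= -101, A raises IndexError (BIT indexing outside the size-100 tree) while B returns the pair count as usual. — e.g. on solve([5, 150]): A raises IndexError, B returns 2
import Mathlib
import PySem

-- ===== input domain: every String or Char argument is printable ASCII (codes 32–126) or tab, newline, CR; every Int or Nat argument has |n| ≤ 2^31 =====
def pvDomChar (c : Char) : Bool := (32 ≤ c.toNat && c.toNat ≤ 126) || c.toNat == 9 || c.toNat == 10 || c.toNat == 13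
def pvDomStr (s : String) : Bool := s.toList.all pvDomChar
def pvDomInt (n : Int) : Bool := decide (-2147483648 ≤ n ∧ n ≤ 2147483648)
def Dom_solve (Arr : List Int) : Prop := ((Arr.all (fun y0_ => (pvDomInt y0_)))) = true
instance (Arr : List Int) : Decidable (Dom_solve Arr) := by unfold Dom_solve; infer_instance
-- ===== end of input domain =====

-- B replaces A's Fenwick (BIT) tree with a direct scan of the already-seen prefix that
-- counts strictly-smaller and strictly-larger earlier elements (objective: simpler; not faster).


-- ===== PORT A =====
-- Python's `index & (-index)` (PySem.Int.band is Python's `&`, exact)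
def pvLowbit (i : Int) : Int := PySem.Int.band i (-i)

-- BIT.update for the size-100 BIT: the Python while-loop, made total by fuel
-- (inside Pre_ the loop runs at most 7 times, so fuel 100 is never exhausted).
-- `self.Tree[index] += value`: inside Pre_ every written index is in the range 1..99,
-- so `.toNat` indexing and `getD _ 0` are exact (no negative/out-of-range index).
def bitUpdate : Nat → List Int → Int → Int → List Int
  | 0, tree, _, _ => tree
  | f+1, tree, index, value =>
      if index < 100 then
        bitUpdate f (tree.set index.toNat (tree.getD index.toNat 0 + value)) (index + pvLowbit index) value
      else tree

-- BIT.sum: the Python while-loop with accumulator `total`, made total by fuel.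
-- `self.Tree[index]`: inside Pre_ every read index is in the range 1..99 (in range),
-- so `getD _ 0` is exact.
def bitSum : Nat → List Int → Int → Int → Int
  | 0, _, _, total => total
  | f+1, tree, index, total =>
      if index > 0 then bitSum f tree (index - pvLowbit index) (total + tree.getD index.toNat 0) else total

-- for i in range(0, len(Arr)): …  over the state (bitTree.Tree, res)
def solve (Arr : List Int) : Int :=
  ((PySem.List.pyRange 0 (Arr.length : Int) 1).foldl
    (fun (st : List Int × Int) i =>
      let x := PySem.List.pyGetD Arr i 0
      let tree := bitUpdate 100 st.1 x 1
      let larger := i + 1 - bitSum 100 tree x 0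
      let smaller := bitSum 100 tree (x - 1) 0
      (tree, st.2 + (2 * min larger smaller + 1)))
    (List.replicate 100 0, 0)).2

-- ===== PORT B =====
-- state (res, seen); inner loop over `seen` with accumulator (smaller, larger)
def solve_alt (Arr : List Int) : Int :=
  (Arr.foldl
    (fun (st : Int × List Int) x =>
      let c := st.2.foldl
        (fun (p : Int × Int) y =>
          if y < x then (p.1 + 1, p.2) else if y > x then (p.1, p.2 + 1) else p)
        (0, 0)
      (st.1 + (2 * min c.2 c.1 + 1), st.2 ++ [x]))
    (0, [])).1

-- ===== PRECONDITION & SPEC =====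
-- Pre_ excludes exactly the inputs where A does not return: an element ≤ 0 makes
-- BIT.update loop forever, and (with all elements ≥ 1) an element ≥ 100 makes
-- BIT.sum raise IndexError; A returns normally on every list over 1..99.
def Pre_solve (Arr : List Int) : Prop := ∀ x ∈ Arr, 1 ≤ x ∧ x ≤ 99
instance (Arr : List Int) : Decidable (Pre_solve Arr) := by unfold Pre_solve; infer_instance
def pvWitness_solve : List Int := ([3, 1, 4, 1, 5, 92, 65])

-- When the first element outside the range 1..99 is ≥ 100 or ≤ -101, A raises IndexError
-- (BIT indexing outside the size-100 tree) while B returns the pair count as usual.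
-- (A first element in -100..0 instead makes A loop forever: not a raise, still outside Pre_.)
def Raises_solve (Arr : List Int) : Prop :=
  ∃ i : Nat, i < Arr.length ∧ (∀ j : Nat, j < i → 1 ≤ Arr.getD j 0 ∧ Arr.getD j 0 ≤ 99)
    ∧ (100 ≤ Arr.getD i 0 ∨ Arr.getD i 0 ≤ -101)
instance (Arr : List Int) : Decidable (Raises_solve Arr) := by unfold Raises_solve; infer_instance
def pvRaiseWitness_solve : List Int := ([5, 150])
def pvRaiseWitnessOut_solve : Int := 2

def Spec_solve (Arr : List Int) (out : Int) : Prop := out = solve_alt Arr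
instance (Arr : List Int) (out : Int) : Decidable (Spec_solve Arr out) := by unfold Spec_solve; infer_instance

-- ===== CLAIM (what is proved, stated in full; the proofs are below) =====
def Claim_equal_solve : Prop := ∀ (Arr : List Int), Dom_solve Arr → Pre_solve Arr → Spec_solve Arr (solve Arr)
def Claim_raises_solve : Prop := (∀ (Arr : List Int), Dom_solve Arr → Raises_solve Arr → ¬ Pre_solve Arr) ∧ (Dom_solve (pvRaiseWitness_solve) ∧ Raises_solve (pvRaiseWitness_solve) ∧ solve_alt (pvRaiseWitness_solve) = pvRaiseWitnessOut_solve)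

-- ===== LEMMAS AND PROOFS =====

-- the index chains the two BIT while-loops walk (proof-side only)
def updChain : Nat → Int → List Int
  | 0, _ => []
  | f+1, i => if i < 100 then i :: updChain f (i + pvLowbit i) else []

def sumChain : Nat → Int → List Int
  | 0, _ => []
  | f+1, i => if i > 0 then i :: sumChain f (i - pvLowbit i) else []

lemma bitSum_eq (f : Nat) : ∀ (tree : List Int) (i t : Int),
    bitSum f tree i t = t + ((sumChain f i).map (fun j => tree.getD j.toNat 0)).sum := by
  induction f with
  | zero => intro tree i t; simp [bitSum, sumChain]
  | succ f ih =>
      intro tree i t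
      simp only [bitSum, sumChain]
      split
      · rw [ih]; simp; ring
      · simp

lemma bitUpdate_eq (f : Nat) : ∀ (tree : List Int) (i v : Int),
    bitUpdate f tree i v
      = (updChain f i).foldl (fun t j => t.set j.toNat (t.getD j.toNat 0 + v)) tree := by
  induction f with
  | zero => intro tree i v; simp [bitUpdate, updChain]
  | succ f ih =>
      intro tree i v
      simp only [bitUpdate, updChain]
      split
      · rw [ih]; simp
      · simp

lemma sumChain_pos (f : Nat) : ∀ (i : Int), ∀ j ∈ sumChain f i, 0 < j := by
  induction f with
  | zero => intro i j hj; simp [sumChain] at hj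
  | succ f ih =>
      intro i j hj
      simp only [sumChain] at hj
      split at hj
      · rcases List.mem_cons.1 hj with h | h
        · omega
        · exact ih _ _ h
      · simp at hj

-- the Fenwick fact: the update chain of v meets the query chain of q exactly once
-- if v ≤ q and never otherwise — checked by computation for all v in 1..99 and q in 0..99
set_option maxHeartbeats 2000000 in
lemma fact1_nat : ((List.range 99).all (fun a => (List.range 100).all (fun b =>
    decide (((updChain 100 ((a:Int)+1)).map (fun u => ((sumChain 100 (b:Int)).count u : Int))).sum
      = if (a:Int)+1 ≤ (b:Int) then 1 else 0)))) = true := by decide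

lemma fact2_nat : ((List.range 99).all (fun a =>
    (updChain 100 ((a:Int)+1)).all (fun j => decide (1 ≤ j) && decide (j ≤ 99)))) = true := by decide

lemma fact1 (v q : Int) (hv1 : 1 ≤ v) (hv2 : v ≤ 99) (hq1 : 0 ≤ q) (hq2 : q ≤ 99) :
    ((updChain 100 v).map (fun u => ((sumChain 100 q).count u : Int))).sum
      = if v ≤ q then 1 else 0 := by
  have h := List.all_eq_true.1 fact1_nat ((v - 1).toNat) (List.mem_range.2 (by omega))
  have h2 := List.all_eq_true.1 h (q.toNat) (List.mem_range.2 (by omega))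
  have e1 : ((v - 1).toNat : Int) + 1 = v := by omega
  have e2 : (q.toNat : Int) = q := by omega
  rw [e1, e2] at h2
  exact of_decide_eq_true h2

lemma fact2 (v : Int) (hv1 : 1 ≤ v) (hv2 : v ≤ 99) :
    ∀ j ∈ updChain 100 v, 1 ≤ j ∧ j ≤ 99 := by
  have h := List.all_eq_true.1 fact2_nat ((v - 1).toNat) (List.mem_range.2 (by omega))
  have e1 : ((v - 1).toNat : Int) + 1 = v := by omega
  rw [e1] at h
  intro j hj
  have := List.all_eq_true.1 h j hj
  simp at this
  exact this

lemma sum_getD_set (t : List Int) (u : Int) (hu : 1 ≤ u) (hlen : u.toNat < t.length) :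
    ∀ (S : List Int), (∀ j ∈ S, 0 < j) →
    (S.map (fun j => (t.set u.toNat (t.getD u.toNat 0 + 1)).getD j.toNat 0)).sum
      = (S.map (fun j => t.getD j.toNat 0)).sum + (S.count u : Int) := by
  intro S
  induction S with
  | nil => simp
  | cons j S ih =>
      intro hS
      have hj : 0 < j := hS j (by simp)
      have htail := ih (fun k hk => hS k (by simp [hk]))
      by_cases hju : j = u
      · subst hju
        rw [List.map_cons, List.map_cons, List.sum_cons, List.sum_cons, htail]
        rw [List.count_cons_self]
        have : (t.set j.toNat (t.getD j.toNat 0 + 1)).getD j.toNat 0 = t.getD j.toNat 0 + 1 := by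
          simp [List.getD, hlen]
        rw [this]; push_cast; ring
      · rw [List.map_cons, List.map_cons, List.sum_cons, List.sum_cons, htail]
        rw [List.count_cons_of_ne (by exact fun h => hju h)]
        have hne : u.toNat ≠ j.toNat := by omega
        have : (t.set u.toNat (t.getD u.toNat 0 + 1)).getD j.toNat 0 = t.getD j.toNat 0 := by
          simp [List.getD, List.getElem?_set_ne hne]
        rw [this]; ring

lemma updFold : ∀ (U : List Int), (∀ u ∈ U, 1 ≤ u ∧ u ≤ 99) → ∀ (t : List Int), t.length = 100 →
    (U.foldl (fun t j => t.set j.toNat (t.getD j.toNat 0 + 1)) t).length = 100 ∧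
    ∀ S : List Int, (∀ j ∈ S, 0 < j) →
      ((S.map (fun j => (U.foldl (fun t j => t.set j.toNat (t.getD j.toNat 0 + 1)) t).getD j.toNat 0)).sum
        = (S.map (fun j => t.getD j.toNat 0)).sum + (U.map (fun u => (S.count u : Int))).sum) := by
  intro U
  induction U with
  | nil => intro _ t ht; exact ⟨ht, by simp⟩
  | cons u U ih =>
      intro hU t ht
      have hu := hU u (by simp)
      have ht' : (t.set u.toNat (t.getD u.toNat 0 + 1)).length = 100 := by simp [ht]
      have hrec := ih (fun w hw => hU w (by simp [hw])) _ ht'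
      refine ⟨by simpa using hrec.1, ?_⟩
      intro S hS
      rw [List.foldl_cons, hrec.2 S hS, sum_getD_set t u hu.1 (by omega) S hS]
      simp [List.sum_cons]; ring

-- the BIT tree after inserting every element of p
def treeOf (p : List Int) : List Int :=
  p.foldl (fun t x => bitUpdate 100 t x 1) (List.replicate 100 (0:Int))

-- the BIT invariant: a prefix-sum query q answers "how many inserted values are ≤ q"
lemma treeInv : ∀ (p : List Int), (∀ x ∈ p, 1 ≤ x ∧ x ≤ 99) →
    (treeOf p).length = 100 ∧
    ∀ q : Int, 0 ≤ q → q ≤ 99 →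
      ((sumChain 100 q).map (fun j => (treeOf p).getD j.toNat 0)).sum
        = (p.countP (fun y => decide (y ≤ q)) : Int) := by
  intro p
  induction p using List.reverseRecOn with
  | nil =>
      intro _
      refine ⟨by simp [treeOf], ?_⟩
      intro q _ _
      simp only [treeOf, List.foldl_nil, List.countP_nil, Nat.cast_zero]
      apply List.sum_eq_zero
      intro y hy
      obtain ⟨j, _, hj⟩ := List.mem_map.1 hy
      rw [← hj, List.getD_eq_getElem?_getD, List.getElem?_replicate]
      split <;> rfl
  | append_singleton p x ih =>
      intro hpre
      have hx := hpre x (by simp)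
      have hp : ∀ y ∈ p, 1 ≤ y ∧ y ≤ 99 := fun y hy => hpre y (by simp [hy])
      obtain ⟨hlen, hsum⟩ := ih hp
      have hT : treeOf (p ++ [x]) = bitUpdate 100 (treeOf p) x 1 := by
        simp [treeOf, List.foldl_append]
      rw [hT, bitUpdate_eq]
      have hchain := fact2 x hx.1 hx.2
      have hfold := updFold (updChain 100 x) hchain (treeOf p) hlen
      refine ⟨hfold.1, ?_⟩
      intro q hq1 hq2
      have hSpos := sumChain_pos 100 q
      rw [hfold.2 _ hSpos, hsum q hq1 hq2, fact1 x q hx.1 hx.2 hq1 hq2]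
      rw [List.countP_append]
      by_cases hxq : x ≤ q
      · simp [hxq]
      · simp [hxq]

lemma count_split (x : Int) (p : List Int) :
    p.countP (fun y => decide (y ≤ x)) + p.countP (fun y => decide (y > x)) = p.length := by
  induction p with
  | nil => simp
  | cons a l ih =>
      by_cases h : a ≤ x
      · have hd1 : decide (a ≤ x) = true := decide_eq_true h
        have hd2 : decide (a > x) = false := decide_eq_false (by omega)
        rw [List.countP_cons, List.countP_cons, hd1, hd2, if_pos rfl,
          if_neg (fun hh => Bool.noConfusion hh), List.length_cons]
        omega
      · have hd1 : decide (a ≤ x) = false := decide_eq_false h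
        have hd2 : decide (a > x) = true := decide_eq_true (by omega)
        rw [List.countP_cons, List.countP_cons, hd1, hd2, if_pos rfl,
          if_neg (fun hh => Bool.noConfusion hh), List.length_cons]
        omega

-- B's inner loop counts the strictly-smaller and strictly-larger earlier elements
lemma bcount (x : Int) : ∀ (l : List Int) (a b : Int),
    l.foldl (fun (p : Int × Int) y =>
        if y < x then (p.1 + 1, p.2) else if y > x then (p.1, p.2 + 1) else p) (a, b)
      = (a + (l.countP (fun y => decide (y < x)) : Int), b + (l.countP (fun y => decide (y > x)) : Int)) := by
  intro l
  induction l with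
  | nil => intro a b; simp
  | cons y l ih =>
      intro a b
      rw [List.foldl_cons]
      by_cases h1 : y < x
      · have h2 : ¬ (y > x) := by omega
        rw [if_pos h1, ih]
        simp [h1, h2, Prod.ext_iff]
        omega
      · by_cases h2 : y > x
        · rw [if_neg h1, if_pos h2, ih]
          simp [h1, h2, Prod.ext_iff]
          omega
        · rw [if_neg h1, if_neg h2, ih]
          simp [h1, h2]

-- A's fold over range(len(Arr)) with Arr[i] is the same fold over enumerate(Arr)
lemma solve_eq_enum (Arr : List Int) :
    solve Arr = ((PySem.List.enumerate Arr 0).foldl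
      (fun (st : List Int × Int) (p : Int × Int) =>
        let tree := bitUpdate 100 st.1 p.2 1
        let larger := p.1 + 1 - bitSum 100 tree p.2 0
        let smaller := bitSum 100 tree (p.2 - 1) 0
        (tree, st.2 + (2 * min larger smaller + 1)))
      (List.replicate 100 0, 0)).2 := by
  rw [PySem.List.enumerate_eq_map_pyRange (d := 0), List.foldl_map]
  simp [solve]

lemma main_inv : ∀ (p : List Int), (∀ x ∈ p, 1 ≤ x ∧ x ≤ 99) →
    ((PySem.List.enumerate p 0).foldl
      (fun (st : List Int × Int) (q : Int × Int) =>
        let tree := bitUpdate 100 st.1 q.2 1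
        let larger := q.1 + 1 - bitSum 100 tree q.2 0
        let smaller := bitSum 100 tree (q.2 - 1) 0
        (tree, st.2 + (2 * min larger smaller + 1)))
      (List.replicate 100 0, 0))
    = (treeOf p,
       (p.foldl (fun (st : Int × List Int) x =>
          let c := st.2.foldl
            (fun (pr : Int × Int) y =>
              if y < x then (pr.1 + 1, pr.2) else if y > x then (pr.1, pr.2 + 1) else pr)
            (0, 0)
          (st.1 + (2 * min c.2 c.1 + 1), st.2 ++ [x])) (0, [])).1)
    ∧ (p.foldl (fun (st : Int × List Int) x =>
          let c := st.2.foldl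
            (fun (pr : Int × Int) y =>
              if y < x then (pr.1 + 1, pr.2) else if y > x then (pr.1, pr.2 + 1) else pr)
            (0, 0)
          (st.1 + (2 * min c.2 c.1 + 1), st.2 ++ [x])) (0, [])).2 = p := by
  intro p
  induction p using List.reverseRecOn with
  | nil => intro _; refine ⟨by simp [PySem.List.enumerate, treeOf], by simp⟩
  | append_singleton p x ih =>
      intro hpre
      have hx := hpre x (by simp)
      have hp : ∀ y ∈ p, 1 ≤ y ∧ y ≤ 99 := fun y hy => hpre y (by simp [hy])
      obtain ⟨hA, hB⟩ := ih hp
      obtain ⟨hlen, hsum⟩ := treeInv p hp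
      obtain ⟨hlen', hsum'⟩ := treeInv (p ++ [x]) hpre
      rw [PySem.List.enumerate_append, List.foldl_append, List.foldl_append, hA]
      simp only [PySem.List.enumerate, List.foldl_cons, List.foldl_nil]
      have hTstep : bitUpdate 100 (treeOf p) x 1 = treeOf (p ++ [x]) := by
        simp [treeOf, List.foldl_append]
      rw [hB, hTstep, bitSum_eq, bitSum_eq]
      rw [hsum' x (by omega) (by omega), hsum' (x - 1) (by omega) (by omega)]
      rw [bcount]
      have hcle : ((p ++ [x]).countP (fun y => decide (y ≤ x)))
          = p.countP (fun y => decide (y ≤ x)) + 1 := by simp [List.countP_append]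
      have hsplit := count_split x p
      have hcsm0 : ([x].countP (fun y => decide (y ≤ x - 1))) = 0 := by simp
      have hcong : p.countP (fun y => decide (y ≤ x - 1)) = p.countP (fun y => decide (y < x)) :=
        List.countP_congr (fun y _ => by simp only [decide_eq_true_eq]; omega)
      have e1 : (0 + (p.length : Int) + 1 - (0 + (((p ++ [x]).countP (fun y => decide (y ≤ x)) : Nat) : Int)))
          = 0 + ((p.countP (fun y => decide (y > x)) : Nat) : Int) := by
        rw [hcle]; push_cast; omega
      have e2 : (0 + (((p ++ [x]).countP (fun y => decide (y ≤ x - 1)) : Nat) : Int))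
          = 0 + ((p.countP (fun y => decide (y < x)) : Nat) : Int) := by
        rw [List.countP_append, hcsm0, hcong]; simp
      rw [e1, e2]
      exact ⟨rfl, rfl⟩

-- ===== VERDICT (by name: the statement is the Claim_ definition above) =====
theorem solve_spec : Claim_equal_solve := by
  intro Arr _ hpre
  unfold Spec_solve
  rw [solve_eq_enum, solve_alt, (main_inv Arr hpre).1]

@[simp] theorem solve_raises : Claim_raises_solve := by
  unfold Claim_raises_solve
  constructor
  · intro Arr _ hr hp
    obtain ⟨i, hi, _, hbad⟩ := hr
    have hmem : Arr.getD i 0 ∈ Arr := by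
      rw [List.getD_eq_getElem Arr 0 hi]
      exact List.getElem_mem hi
    have := hp _ hmem
    omega
  · exact ⟨by decide, by decide, by decide⟩
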